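-- pv_equiv track=rewrite | github.com/KitTheFox123/workspace | scripts/fixed-point-brier.py | fixed_brier_decomposition
-- ===== SOURCE A (Python) =====
-- SCALE = 10000  # 4 decimal places
--
-- def fixed_brier(forecast_scaled: int, outcome_scaled: int) -> int:
--     """Brier score in fixed-point. All values scaled by SCALE.
--
--     Brier = (forecast - outcome)²
--     In fixed-point: (f - o)² / SCALE  (to keep same scale)
--     """
--     diff = forecast_scaled - outcome_scaled
--     return (diff * diff) // SCALE
--
-- def fixed_brier_decomposition(forecasts: list[int], outcomes: list[int]) -> dict:
--     """Brier decomposition in fixed-point: reliability + resolution - uncertainty."""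
--     n = len(forecasts)
--     if n == 0:
--         return {"brier": 0, "reliability": 0, "resolution": 0, "uncertainty": 0}
--
--     # Mean outcome (scaled)
--     mean_outcome = sum(outcomes) // n
--
--     # Uncertainty: var(outcomes) = E[(o - mean_o)²] / SCALE
--     uncertainty = sum((o - mean_outcome) ** 2 for o in outcomes) // (n * SCALE) if n > 0 else 0
--
--     # Brier score
--     brier = sum(fixed_brier(f, o) for f, o in zip(forecasts, outcomes)) // n
--
--     # Resolution: how much forecasts separate outcomes
--     resolution = uncertainty - brier  # Simplified; full decomposition needs binning
--
--     # Reliability: calibration error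
--     reliability = brier - uncertainty + resolution  # = brier - (uncertainty - resolution)
--
--     return {
--         "brier": brier,
--         "reliability": reliability,
--         "resolution": resolution,
--         "uncertainty": uncertainty,
--     }
-- ===== SOURCE B (Python) =====
-- SCALE = 10000
--
-- def fixed_brier_decomposition(forecasts, outcomes):
--     """Brier decomposition via running sums: one pass builds total/sumsq/brier_sum,
--     then uncertainty uses the exact integer identity sum((o-m)**2) == sumsq - 2*m*total + k*m*m."""
--     n = len(forecasts)
--     if n == 0:
--         return {"brier": 0, "reliability": 0, "resolution": 0, "uncertainty": 0}
--     total = 0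
--     sumsq = 0
--     for o in outcomes:
--         total += o
--         sumsq += o * o
--     brier_sum = 0
--     for f, o in zip(forecasts, outcomes):
--         d = f - o
--         brier_sum += (d * d) // SCALE
--     m = total // n
--     uncertainty = (sumsq - 2 * m * total + len(outcomes) * m * m) // (n * SCALE)
--     brier = brier_sum // n
--     resolution = uncertainty - brier
--     reliability = brier - uncertainty + resolution
--     return {
--         "brier": brier,
--         "reliability": reliability,
--         "resolution": resolution,
--         "uncertainty": uncertainty,
--     }
-- ===== Notes on version B (the rewrite author's own statement) =====
-- stated objective: alternative
-- what changed: B keeps running sums (total, sum of squares, brier sum) in accumulator loops and computes the uncertainty numerator by the exact integer identity sum((o-m)**2) = sumsq - 2*m*total + k*m*m, eliminating A's second deviations pass over the outcomes after the mean is known.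
import Mathlib
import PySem

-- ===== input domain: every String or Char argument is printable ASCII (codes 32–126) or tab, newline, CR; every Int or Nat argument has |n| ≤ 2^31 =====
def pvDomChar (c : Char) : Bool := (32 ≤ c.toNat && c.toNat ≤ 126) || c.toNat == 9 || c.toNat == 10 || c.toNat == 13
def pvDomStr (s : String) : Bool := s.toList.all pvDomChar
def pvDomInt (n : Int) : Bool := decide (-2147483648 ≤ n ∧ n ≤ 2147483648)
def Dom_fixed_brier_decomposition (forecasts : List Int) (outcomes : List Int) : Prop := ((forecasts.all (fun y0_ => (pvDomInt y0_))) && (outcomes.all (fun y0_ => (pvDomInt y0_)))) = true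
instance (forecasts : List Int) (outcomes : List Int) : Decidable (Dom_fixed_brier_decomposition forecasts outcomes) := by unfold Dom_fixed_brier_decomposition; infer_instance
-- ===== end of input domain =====

-- B replaces A's mean-then-deviations second pass over outcomes by running sums and the exact
-- integer identity sum((o-m)^2) = sumsq - 2*m*total + k*m*m (objective: alternative decomposition).

-- ===== PORT A =====
def fixed_brier (forecast_scaled : Int) (outcome_scaled : Int) : Int :=
  let diff := forecast_scaled - outcome_scaled
  PySem.Int.floordiv (diff * diff) 10000

def fixed_brier_decomposition (forecasts : List Int) (outcomes : List Int) : List (String × Int) :=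
  let n : Int := forecasts.length
  if n == 0 then
    [("brier", 0), ("reliability", 0), ("resolution", 0), ("uncertainty", 0)]
  else
    let mean_outcome := PySem.Int.floordiv (outcomes.foldl (· + ·) 0) n
    let uncertainty :=
      if n > 0 then
        PySem.Int.floordiv ((outcomes.map (fun o => (o - mean_outcome) ^ 2)).foldl (· + ·) 0) (n * 10000)
      else 0
    let brier :=
      PySem.Int.floordiv (((forecasts.zip outcomes).map (fun p => fixed_brier p.1 p.2)).foldl (· + ·) 0) n
    let resolution := uncertainty - brier
    let reliability := brier - uncertainty + resolution
    [("brier", brier), ("reliability", reliability), ("resolution", resolution), ("uncertainty", uncertainty)]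

-- ===== PORT B =====
def fixed_brier_decomposition_alt (forecasts : List Int) (outcomes : List Int) : List (String × Int) :=
  let n : Int := forecasts.length
  if n == 0 then
    [("brier", 0), ("reliability", 0), ("resolution", 0), ("uncertainty", 0)]
  else
    let ts := outcomes.foldl (fun acc o => (acc.1 + o, acc.2 + o * o)) ((0 : Int), (0 : Int))
    let brier_sum :=
      (forecasts.zip outcomes).foldl
        (fun acc p => acc + PySem.Int.floordiv ((p.1 - p.2) * (p.1 - p.2)) 10000) 0
    let m := PySem.Int.floordiv ts.1 n
    let uncertainty :=
      PySem.Int.floordiv (ts.2 - 2 * m * ts.1 + (outcomes.length : Int) * m * m) (n * 10000)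
    let brier := PySem.Int.floordiv brier_sum n
    let resolution := uncertainty - brier
    let reliability := brier - uncertainty + resolution
    [("brier", brier), ("reliability", reliability), ("resolution", resolution), ("uncertainty", uncertainty)]

-- ===== PRECONDITION & SPEC =====
def Spec_fixed_brier_decomposition (forecasts : List Int) (outcomes : List Int) (out : List (String × Int)) : Prop := out = fixed_brier_decomposition_alt forecasts outcomes
instance (forecasts : List Int) (outcomes : List Int) (out : List (String × Int)) : Decidable (Spec_fixed_brier_decomposition forecasts outcomes out) := by unfold Spec_fixed_brier_decomposition; infer_instance

-- ===== CLAIM (what is proved, stated in full; the proofs are below) =====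
def Claim_equal_fixed_brier_decomposition : Prop := ∀ (forecasts : List Int) (outcomes : List Int), Dom_fixed_brier_decomposition forecasts outcomes → Spec_fixed_brier_decomposition forecasts outcomes (fixed_brier_decomposition forecasts outcomes)

-- ===== LEMMAS AND PROOFS =====

/-- Shifting the accumulator out of a `foldl (fun s x => s + g x)`. -/
theorem foldl_addg_shift {α : Type} (g : α → Int) :
    ∀ (l : List α) (a : Int), l.foldl (fun s x => s + g x) a = a + l.foldl (fun s x => s + g x) 0 := by
  intro l
  induction l with
  | nil => intro a; simp
  | cons x xs ih =>
      intro a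
      simp only [List.foldl_cons]
      rw [ih (a + g x), ih (0 + g x)]
      ring

/-- B's pair fold computes (sum, sum of squares) componentwise. -/
theorem pair_fold_eq :
    ∀ (l : List Int) (a b : Int),
      l.foldl (fun acc o => (acc.1 + o, acc.2 + o * o)) (a, b)
        = (l.foldl (· + ·) a, l.foldl (fun s o => s + o * o) b) := by
  intro l
  induction l with
  | nil => intro a b; simp
  | cons x xs ih => intro a b; simpa using ih (a + x) (b + x * x)

/-- `foldl (·+·)` is `foldl (fun s x => s + id x)`. -/
theorem foldl_add_eq (l : List Int) (a : Int) :
    l.foldl (· + ·) a = l.foldl (fun s x => s + x) a := rfl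

/-- Exact integer identity: sum of squared deviations = sumsq - 2 m total + k m². -/
theorem dev_identity (m : Int) :
    ∀ (l : List Int),
      (l.map (fun o => (o - m) ^ 2)).foldl (· + ·) 0
        = l.foldl (fun s o => s + o * o) 0 - 2 * m * l.foldl (· + ·) 0 + (l.length : Int) * m * m := by
  intro l
  induction l with
  | nil => simp
  | cons x xs ih =>
      simp only [List.map_cons, List.foldl_cons, List.length_cons]
      rw [foldl_addg_shift (fun o => o) xs, foldl_add_eq]
      rw [show ∀ a, xs.foldl (· + ·) a = xs.foldl (fun s x => s + x) a from fun _ => rfl] at ih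
      rw [foldl_addg_shift (fun o => o * o) xs]
      rw [show ((xs.map (fun o => (o - m) ^ 2)).foldl (· + ·) (0 + (x - m) ^ 2))
            = 0 + (x - m) ^ 2 + (xs.map (fun o => (o - m) ^ 2)).foldl (fun s y => s + y) 0 from
            foldl_addg_shift (fun y => y) _ _]
      rw [show ((xs.map (fun o => (o - m) ^ 2)).foldl (· + ·) 0)
            = (xs.map (fun o => (o - m) ^ 2)).foldl (fun s y => s + y) 0 from rfl] at ih
      rw [ih]
      push_cast
      ring

/-- A's map-then-sum of fixed_brier equals B's direct accumulating fold. -/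
theorem brier_fold_eq (l : List (Int × Int)) :
    (l.map (fun p => fixed_brier p.1 p.2)).foldl (· + ·) 0
      = l.foldl (fun acc p => acc + PySem.Int.floordiv ((p.1 - p.2) * (p.1 - p.2)) 10000) 0 := by
  induction l with
  | nil => simp
  | cons x xs ih =>
      simp only [List.map_cons, List.foldl_cons]
      rw [show ((xs.map (fun p => fixed_brier p.1 p.2)).foldl (· + ·) (0 + fixed_brier x.1 x.2))
            = 0 + fixed_brier x.1 x.2 + (xs.map (fun p => fixed_brier p.1 p.2)).foldl (fun s y => s + y) 0 from
            foldl_addg_shift (fun y => y) _ _]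
      rw [foldl_addg_shift (fun p => PySem.Int.floordiv ((p.1 - p.2) * (p.1 - p.2)) 10000) xs]
      rw [show ((xs.map (fun p => fixed_brier p.1 p.2)).foldl (· + ·) 0)
            = (xs.map (fun p => fixed_brier p.1 p.2)).foldl (fun s y => s + y) 0 from rfl] at ih
      rw [ih]
      simp [fixed_brier]

-- ===== VERDICT (by name: the statement is the Claim_ definition above) =====
theorem fixed_brier_decomposition_spec : Claim_equal_fixed_brier_decomposition := by
  intro forecasts outcomes _
  unfold Spec_fixed_brier_decomposition fixed_brier_decomposition fixed_brier_decomposition_alt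
  by_cases h : (forecasts.length : Int) == 0
  · simp [h]
  · have hn : (0 : Int) < (forecasts.length : Int) := by
      rcases Nat.eq_zero_or_pos forecasts.length with h0 | h0
      · exfalso; apply h; simp [h0]
      · exact_mod_cast h0
    simp only [h]
    rw [pair_fold_eq, brier_fold_eq, dev_identity]
    simp
    intro hf
    subst hf
    simp at hn
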